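-- pv_equiv track=rewrite | github.com/JayMonari/py-problems | book-store/book_store.py | find_sets
-- ===== SOURCE A (Python) =====
-- from typing import List
--
-- def find_sets(basket: List[int]) -> List[int]:
--     copy = basket.copy()
--     sets = []
--     uniq = set(copy)
--     while copy:
--         sets.append(len(uniq))
--         for b in uniq:
--             copy.remove(b)
--         uniq = set(copy)
--     return sets
-- ===== SOURCE B (Python) =====
-- from typing import List
--
-- def find_sets(basket: List[int]) -> List[int]:
--     freq = {}
--     for b in basket:
--         freq[b] = freq.get(b, 0) + 1
--     counts = list(freq.values())
--     m = max(counts, default=0)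
--     return [sum(1 for c in counts if c > i) for i in range(m)]
-- ===== Notes on version B (the rewrite author's own statement) =====
-- stated objective: faster
-- what changed: Instead of repeatedly deleting one occurrence of every distinct book from a working copy (a removal pass per set), B builds a frequency map in one pass and reads off sets[i] as the number of distinct books with frequency > i.
import Mathlib
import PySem

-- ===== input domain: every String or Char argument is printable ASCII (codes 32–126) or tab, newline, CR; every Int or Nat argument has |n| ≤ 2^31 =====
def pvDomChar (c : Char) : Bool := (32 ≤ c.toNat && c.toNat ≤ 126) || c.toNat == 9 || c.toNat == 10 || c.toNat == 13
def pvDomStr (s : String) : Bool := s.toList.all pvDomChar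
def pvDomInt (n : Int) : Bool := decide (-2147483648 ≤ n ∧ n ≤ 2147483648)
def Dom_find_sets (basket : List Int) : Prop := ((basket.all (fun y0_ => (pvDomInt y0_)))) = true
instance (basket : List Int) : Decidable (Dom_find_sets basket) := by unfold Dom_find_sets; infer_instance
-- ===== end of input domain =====

-- B replaces A's repeated removal passes over the list by a frequency map built once:
-- sets[i] is the number of distinct values with frequency > i.

-- ===== PORT A =====
-- one removal pass: 'for b in uniq: copy.remove(b)'; remove? never returns none here
-- (each b comes from set(copy), so it is present), hence the .getD fallback is inert.
def find_setsPass (copy : List Int) (uniq : List Int) : List Int :=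
  uniq.foldl (fun c b => (PySem.List.remove? c b).getD c) copy

-- length bookkeeping of one pass (cited by the while loop's decreasing_by)
lemma find_setsPass_length (uniq : List Int) : ∀ (copy : List Int), uniq.Nodup →
    (∀ x ∈ uniq, x ∈ copy) → (find_setsPass copy uniq).length = copy.length - uniq.length := by
  induction uniq with
  | nil => intro copy _ _; simp [find_setsPass]
  | cons b t ih =>
    intro copy hnd hsub
    have hb : b ∈ copy := hsub b (by simp)
    have hstep : find_setsPass copy (b :: t) = find_setsPass (copy.erase b) t := by
      simp [find_setsPass, PySem.List.remove?_eq_some_erase copy b hb]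
    have hsub' : ∀ x ∈ t, x ∈ copy.erase b := by
      intro x hx
      have hne : x ≠ b := by
        intro he; subst he; exact (List.nodup_cons.mp hnd).1 hx
      exact (List.mem_erase_of_ne hne).mpr (hsub x (List.mem_cons_of_mem _ hx))
    rw [hstep, ih (copy.erase b) hnd.of_cons hsub', List.length_erase_of_mem hb]
    have : 1 ≤ copy.length := List.length_pos_of_mem hb
    simp only [List.length_cons]
    omega

lemma find_setsPass_length_lt (copy : List Int) (h : copy ≠ []) :
    (find_setsPass copy (PySem.Set.ofList copy)).length < copy.length := by
  have hnd : (PySem.Set.ofList copy).Nodup := PySem.Set.nodup_ofList copy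
  have hsub : ∀ x ∈ PySem.Set.ofList copy, x ∈ copy := by
    intro x hx; exact (PySem.Set.mem_ofList copy x).mp hx
  rw [find_setsPass_length _ copy hnd hsub]
  obtain ⟨y, ys, rfl⟩ := List.exists_cons_of_ne_nil h
  have hy : y ∈ PySem.Set.ofList (y :: ys) := (PySem.Set.mem_ofList _ y).mpr (by simp)
  have h1 : 1 ≤ (PySem.Set.ofList (y :: ys)).length := List.length_pos_of_mem hy
  simp only [List.length_cons]
  omega

-- the while loop: append len(set(copy)), remove one occurrence of each distinct value, repeat
def find_setsLoop (copy : List Int) : List Int :=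
  if h : copy = [] then []
  else
    ((PySem.Set.ofList copy).length : Int) ::
      find_setsLoop (find_setsPass copy (PySem.Set.ofList copy))
termination_by copy.length
decreasing_by exact find_setsPass_length_lt copy h

def find_sets (basket : List Int) : List Int := find_setsLoop basket

-- ===== PORT B =====
def find_sets_alt (basket : List Int) : List Int :=
  let freq := basket.foldl (fun d b => d.insert b (d.getD b 0 + 1)) PySem.Dict.empty
  let counts := freq.values
  let m := PySem.List.maxD counts (fun c => c) 0
  (PySem.List.pyRange 0 m 1).map
    (fun i => counts.foldl (fun s c => if c > i then s + 1 else s) (0 : Int))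

-- ===== PRECONDITION & SPEC =====
def Spec_find_sets (basket : List Int) (out : List Int) : Prop := out = find_sets_alt basket
instance (basket : List Int) (out : List Int) : Decidable (Spec_find_sets basket out) := by unfold Spec_find_sets; infer_instance

-- ===== CLAIM (what is proved, stated in full; the proofs are below) =====
def Claim_equal_find_sets : Prop := ∀ (basket : List Int), Dom_find_sets basket → Spec_find_sets basket (find_sets basket)

-- ===== LEMMAS AND PROOFS =====

-- number of distinct values of c with multiplicity > k
def nFreq (c : List Int) (k : Nat) : Nat :=
  (PySem.List.dedup c).countP (fun v => k < List.count v c)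

-- largest multiplicity occurring in c
def maxFreq (c : List Int) : Nat :=
  (PySem.List.dedup c).foldl (fun a v => max a (List.count v c)) 0

-- the common value of both programs
def specSets (c : List Int) : List Int :=
  (List.range (maxFreq c)).map (fun k => ((nFreq c k : Nat) : Int))

lemma pass_count (t : List Int) : ∀ (copy : List Int), t.Nodup → (∀ x ∈ t, x ∈ copy) →
    ∀ v, List.count v (find_setsPass copy t)
      = List.count v copy - (if v ∈ t then 1 else 0) := by
  induction t with
  | nil => intro copy _ _ v; simp [find_setsPass]
  | cons b t ih =>
    intro copy hnd hsub v
    have hb : b ∈ copy := hsub b (by simp)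
    have hstep : find_setsPass copy (b :: t) = find_setsPass (copy.erase b) t := by
      simp [find_setsPass, PySem.List.remove?_eq_some_erase copy b hb]
    have hsub' : ∀ x ∈ t, x ∈ copy.erase b := by
      intro x hx
      have hne : x ≠ b := by intro he; subst he; exact (List.nodup_cons.mp hnd).1 hx
      exact (List.mem_erase_of_ne hne).mpr (hsub x (List.mem_cons_of_mem _ hx))
    rw [hstep, ih (copy.erase b) hnd.of_cons hsub' v, List.count_erase]
    by_cases hvb : v = b
    · subst hvb
      have hvt : v ∉ t := (List.nodup_cons.mp hnd).1
      simp [hvt]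
    · have : (b == v) = false := by simp [Ne.symm hvb]
      simp [this, hvb]

def passAll (c : List Int) : List Int := find_setsPass c (PySem.Set.ofList c)

lemma pass_count' (c : List Int) (v : Int) :
    List.count v (passAll c) = List.count v c - 1 := by
  have h := pass_count (PySem.Set.ofList c) c (PySem.Set.nodup_ofList c)
    (fun x hx => (PySem.Set.mem_ofList c x).mp hx) v
  unfold passAll
  rw [h]
  by_cases hv : v ∈ c
  · simp [(PySem.Set.mem_ofList c v).mpr hv]
  · have h0 : List.count v c = 0 := by rwa [List.count_eq_zero]
    simp [h0, (PySem.Set.mem_ofList c v).not.mpr hv]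

lemma mem_passAll (c : List Int) (v : Int) : v ∈ passAll c ↔ 2 ≤ List.count v c := by
  rw [← List.count_pos_iff, pass_count' c v]
  omega

lemma countP_eq_of_mem_iff {l₁ l₂ : List Int} (q : Int → Bool)
    (h₁ : l₁.Nodup) (h₂ : l₂.Nodup) (h : ∀ v, q v = true → (v ∈ l₁ ↔ v ∈ l₂)) :
    l₁.countP q = l₂.countP q := by
  rw [List.countP_eq_length_filter, List.countP_eq_length_filter]
  apply List.Perm.length_eq
  rw [List.perm_ext_iff_of_nodup (h₁.filter q) (h₂.filter q)]
  intro a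
  simp only [List.mem_filter]
  constructor
  · rintro ⟨ha, hq⟩; exact ⟨(h a hq).mp ha, hq⟩
  · rintro ⟨ha, hq⟩; exact ⟨(h a hq).mpr ha, hq⟩

lemma nFreq_pass (c : List Int) (k : Nat) : nFreq (passAll c) k = nFreq c (k + 1) := by
  unfold nFreq
  have h1 : (PySem.List.dedup (passAll c)).countP (fun v => k < List.count v (passAll c))
      = (PySem.List.dedup (passAll c)).countP (fun v => k + 1 < List.count v c) := by
    apply List.countP_congr
    intro v _
    rw [pass_count' c v]
    simp only [decide_eq_true_eq]
    omega
  rw [h1]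
  apply countP_eq_of_mem_iff _ (PySem.List.nodup_dedup _) (PySem.List.nodup_dedup _)
  intro v hq
  simp only [decide_eq_true_eq] at hq
  rw [PySem.List.mem_dedup, PySem.List.mem_dedup, mem_passAll, ← List.count_pos_iff]
  omega

lemma foldl_max_le_nat (l : List Int) (f : Int → Nat) (B : Nat) :
    ∀ a, a ≤ B → (∀ x ∈ l, f x ≤ B) → l.foldl (fun acc y => max acc (f y)) a ≤ B := by
  induction l with
  | nil => intro a ha _; simpa using ha
  | cons x t ih =>
    intro a ha h
    simp only [List.foldl_cons]
    exact ih _ (by simp [ha, h x (by simp)]) (fun y hy => h y (by simp [hy]))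

lemma count_le_maxFreq (c : List Int) (v : Int) (hv : v ∈ c) : List.count v c ≤ maxFreq c :=
  (PySem.List.le_foldl_max_nat (PySem.List.dedup c) (fun v => List.count v c) 0).2 v
    ((PySem.List.mem_dedup c v).mpr hv)

lemma one_le_maxFreq (c : List Int) (h : c ≠ []) : 1 ≤ maxFreq c := by
  obtain ⟨y, ys, rfl⟩ := List.exists_cons_of_ne_nil h
  have := count_le_maxFreq (y :: ys) y (by simp)
  have hpos : 0 < List.count y (y :: ys) := List.count_pos_iff.mpr (by simp)
  omega

lemma exists_count_eq_maxFreq (c : List Int) (h : c ≠ []) :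
    ∃ v ∈ c, List.count v c = maxFreq c := by
  have hmf : maxFreq c = ((PySem.List.dedup c).map (fun v => List.count v c)).foldl max 0 := by
    unfold maxFreq; rw [List.foldl_map]
  rcases PySem.List.foldl_max_mem ((PySem.List.dedup c).map (fun v => List.count v c)) 0 with h0 | hm
  · exfalso
    have := one_le_maxFreq c h
    rw [hmf] at this
    omega
  · rw [← hmf] at hm
    obtain ⟨v, hv, hveq⟩ := List.mem_map.mp hm
    exact ⟨v, (PySem.List.mem_dedup c v).mp hv, hveq⟩

lemma maxFreq_pass (c : List Int) (h : c ≠ []) : maxFreq (passAll c) = maxFreq c - 1 := by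
  have hle : maxFreq (passAll c) ≤ maxFreq c - 1 := by
    show (PySem.List.dedup (passAll c)).foldl (fun a v => max a (List.count v (passAll c))) 0
        ≤ maxFreq c - 1
    apply foldl_max_le_nat
    · omega
    · intro v hv
      rw [PySem.List.mem_dedup] at hv
      have h2 := (mem_passAll c v).mp hv
      have hvc : v ∈ c := by rw [← List.count_pos_iff]; omega
      have := count_le_maxFreq c v hvc
      rw [pass_count' c v]
      omega
  obtain ⟨v, hvc, hveq⟩ := exists_count_eq_maxFreq c h
  by_cases hM : maxFreq c = 1
  · omega
  · have hM2 : 2 ≤ maxFreq c := by have := one_le_maxFreq c h; omega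
    have hv' : v ∈ passAll c := (mem_passAll c v).mpr (by omega)
    have hge : List.count v (passAll c) ≤ maxFreq (passAll c) :=
      count_le_maxFreq (passAll c) v hv'
    rw [pass_count' c v] at hge
    omega

lemma nFreq_zero (c : List Int) : nFreq c 0 = (PySem.Set.ofList c).length := by
  unfold nFreq
  rw [← PySem.List.dedup_eq_ofList]
  apply List.countP_eq_length.mpr
  intro v hv
  simp only [decide_eq_true_eq]
  exact List.count_pos_iff.mpr ((PySem.List.mem_dedup c v).mp hv)

lemma loop_step (c : List Int) (h : c ≠ []) :
    find_setsLoop c = ((PySem.Set.ofList c).length : Int) :: find_setsLoop (passAll c) := by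
  rw [find_setsLoop]
  simp [h, passAll]

lemma loop_nil_spec : find_setsLoop [] = specSets [] := by
  rw [find_setsLoop]
  simp [specSets, maxFreq, PySem.List.dedup]

lemma lemA_aux : ∀ (n : Nat) (c : List Int), c.length ≤ n → find_setsLoop c = specSets c := by
  intro n
  induction n with
  | zero =>
    intro c hc
    have hnil : c = [] := List.length_eq_zero_iff.mp (Nat.le_zero.mp hc)
    subst hnil
    exact loop_nil_spec
  | succ n ih =>
    intro c hc
    by_cases h : c = []
    · subst h; exact loop_nil_spec
    · rw [loop_step c h, ih (passAll c) (by
        have := find_setsPass_length_lt c h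
        unfold passAll
        omega)]
      have hM := one_le_maxFreq c h
      unfold specSets
      rw [maxFreq_pass c h]
      obtain ⟨M', hM'⟩ : ∃ m, maxFreq c = m + 1 := ⟨maxFreq c - 1, by omega⟩
      rw [hM']
      simp only [Nat.add_sub_cancel, List.range_succ_eq_map, List.map_cons, List.map_map]
      congr 1
      · rw [nFreq_zero]
      · apply List.map_congr_left
        intro k _
        simp only [Function.comp]
        rw [nFreq_pass]

lemma lemA (c : List Int) : find_setsLoop c = specSets c := lemA_aux c.length c le_rfl

lemma foldl_max_cast (l : List Nat) (a : Nat) :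
    (l.map (fun n : Nat => (n : Int))).foldl max (a : Int) = ((l.foldl max a : Nat) : Int) := by
  induction l generalizing a with
  | nil => rfl
  | cons x t ih => simp only [List.map_cons, List.foldl_cons, ← Nat.cast_max, ih]

lemma lemB (c : List Int) : find_sets_alt c = specSets c := by
  unfold find_sets_alt
  simp only []
  rw [PySem.Dict.foldl_insert_getD_add_one_eq_counter]
  have hvals : (PySem.Dict.counter c).values
      = ((PySem.List.dedup c).map (fun v => List.count v c)).map (fun n : Nat => (n : Int)) := by
    simp only [PySem.Dict.values, PySem.Dict.items_counter, List.map_map, ← PySem.List.dedup_eq_ofList]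
    rfl
  rw [hvals]
  have hm : PySem.List.maxD (((PySem.List.dedup c).map (fun v => List.count v c)).map (fun n : Nat => (n : Int))) (fun c => c) 0
      = ((maxFreq c : Nat) : Int) := by
    have hmf : maxFreq c = ((PySem.List.dedup c).map (fun v => List.count v c)).foldl max 0 := by
      unfold maxFreq; rw [List.foldl_map]
    unfold PySem.List.maxD
    rw [hmf]
    cases hd : PySem.List.dedup c with
    | nil => simp [PySem.List.max?]
    | cons v t =>
      simp only [List.map_cons, PySem.List.max?_id_cons, Option.getD_some, List.foldl_cons]
      rw [foldl_max_cast]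
      simp
  rw [hm, PySem.List.pyRange_zero_nat, List.map_map]
  unfold specSets
  apply List.map_congr_left
  intro k hk
  simp only [Function.comp]
  rw [PySem.List.foldl_ite_add_one]
  simp only [zero_add, Nat.cast_inj]
  unfold nFreq
  rw [List.countP_map, List.countP_map]
  apply List.countP_congr
  intro v _
  simp [Function.comp]

-- ===== VERDICT (by name: the statement is the Claim_ definition above) =====
theorem find_sets_spec : Claim_equal_find_sets := by
  intro basket _
  unfold Spec_find_sets find_sets
  rw [show find_setsLoop basket = specSets basket from lemA basket, lemB basket]
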